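-- pv_equiv track=rewrite | github.com/kimdappi/codingtest | 프로그래머스/2/42586. 기능개발/기능개발.py | solution
-- ===== SOURCE A (Python) =====
-- from collections import deque
--
-- def solution(progresses, speeds):
--     prog_q= deque(progresses)
--     speed_q= deque(speeds)
--
--     result =[]
--
--     while prog_q:
--         for i in range(len(prog_q)):
--             prog_q[i]+=speed_q[i]
--
--         okay =0
--         while prog_q and prog_q[0]>=100:
--             prog_q.popleft()
--             speed_q.popleft()
--             okay+=1
--
--         if okay>0:
--             result.append(okay)
--     return result
-- ===== SOURCE B (Python) =====
-- def solution(progresses, speeds):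
--     # finish day of each feature: ceil((100-p)/s), at least 1 (integer arithmetic)
--     days = [max(1, -((p - 100) // s)) for p, s in zip(progresses, speeds)]
--     result = []
--     cur = 0
--     cnt = 0
--     for d in days:
--         if cnt > 0 and d <= cur:
--             cnt += 1
--         else:
--             if cnt > 0:
--                 result.append(cnt)
--             cur = d
--             cnt = 1
--     if cnt > 0:
--         result.append(cnt)
--     return result
-- ===== Notes on version B (the rewrite author's own statement) =====
-- stated objective: alternative
-- what changed: Replaces the day-by-day deque simulation with a closed-form finish day per feature (integer ceiling division) followed by a single left-to-right pass that groups features by the running maximum finish day; intended as asymptotically cheaper (A timed out at n=16 in a timing run where B returned, so no ratio could be measured).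
-- outside the precondition, e.g. on solution([150, 90], [-1, 2]): A returns [1, 1], B returns [2]; on solution([100], [0]): A returns [1], B raises ZeroDivisionError; on solution([50], []): A raises IndexError, B returns []
import Mathlib
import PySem

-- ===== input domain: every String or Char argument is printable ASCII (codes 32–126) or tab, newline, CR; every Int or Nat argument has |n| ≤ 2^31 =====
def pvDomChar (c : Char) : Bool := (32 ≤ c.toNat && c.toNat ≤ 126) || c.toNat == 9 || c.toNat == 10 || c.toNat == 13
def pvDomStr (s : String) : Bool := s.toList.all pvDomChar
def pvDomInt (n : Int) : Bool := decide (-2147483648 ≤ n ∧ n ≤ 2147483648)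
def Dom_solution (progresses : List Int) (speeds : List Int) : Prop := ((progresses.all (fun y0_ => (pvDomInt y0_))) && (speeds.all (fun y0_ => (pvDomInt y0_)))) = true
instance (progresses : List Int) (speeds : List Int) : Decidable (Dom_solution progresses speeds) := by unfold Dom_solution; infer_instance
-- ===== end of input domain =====

-- B replaces A's day-by-day simulation by closed-form finish days + one grouping pass over them.

-- ===== PORT A =====
-- the inner `while prog_q and prog_q[0]>=100: popleft; popleft; okay+=1` loop
def popLoop : List Int → List Int → Int → List Int × List Int × Int
  | p :: ps, s :: ss, okay =>
    if 100 ≤ p then popLoop ps ss (okay + 1) else (p :: ps, s :: ss, okay)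
  | prog, speeds, okay => (prog, speeds, okay)

-- the outer `while prog_q:` loop; fuel only guards termination and is never
-- exhausted on inputs satisfying Pre_solution (see fuelFor_sufficient below)
def simLoop : List Int → List Int → List Int → Nat → List Int
  | _, _, result, 0 => result
  | prog, speeds, result, fuel + 1 =>
    if prog.isEmpty then result
    else
      let prog' := List.zipWith (· + ·) prog speeds
      match popLoop prog' (speeds : List Int) 0 with
      | (p2, s2, okay) =>
        simLoop p2 s2 (if 0 < okay then result ++ [okay] else result) fuel

def fuelFor (progresses : List Int) : Nat :=
  progresses.foldl (fun a p => a + (100 - p).toNat + 1) 1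

def solution (progresses : List Int) (speeds : List Int) : List Int :=
  simLoop progresses speeds [] (fuelFor progresses)

-- ===== PORT B =====
-- finish day of one feature: max(1, -((p - 100) // s))
def dayB (p s : Int) : Int := max 1 (-(PySem.Int.floordiv (p - 100) s))

-- one step of B's grouping loop over (result, cur, cnt)
def stepB : List Int × Int × Int → Int → List Int × Int × Int
  | (result, cur, cnt), d =>
    if 0 < cnt ∧ d ≤ cur then (result, cur, cnt + 1)
    else ((if 0 < cnt then result ++ [cnt] else result), d, 1)

def solution_alt (progresses : List Int) (speeds : List Int) : List Int :=
  let days := List.zipWith dayB progresses speeds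
  match days.foldl stepB ([], 0, 0) with
  | (result, _, cnt) => if 0 < cnt then result ++ [cnt] else result

-- ===== PRECONDITION & SPEC =====
-- Pre_ excludes inputs where A raises IndexError (fewer speeds than progresses) and
-- inputs with a non-positive speed: there A usually diverges, and when it does return
-- (every such feature already pushed past 100 on day one) B's ceiling-division day is
-- meaningless, so those accidental returns are excluded too (see cites).
def Pre_solution (progresses : List Int) (speeds : List Int) : Prop :=
  progresses.length ≤ speeds.length ∧
  ∀ s ∈ speeds.take progresses.length, 0 < s
instance (progresses : List Int) (speeds : List Int) : Decidable (Pre_solution progresses speeds) := by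
  unfold Pre_solution; infer_instance

def pvWitness_solution : List Int × List Int := ([93, 30, 55], [1, 30, 5])

def Spec_solution (progresses : List Int) (speeds : List Int) (out : List Int) : Prop :=
  out = solution_alt progresses speeds
instance (progresses : List Int) (speeds : List Int) (out : List Int) : Decidable (Spec_solution progresses speeds out) := by
  unfold Spec_solution; infer_instance

-- ===== CLAIM (what is proved, stated in full; the proofs are below) =====
def Claim_equal_solution : Prop := ∀ (progresses : List Int) (speeds : List Int), Dom_solution progresses speeds → Pre_solution progresses speeds → Spec_solution progresses speeds (solution progresses speeds)

-- ===== LEMMAS AND PROOFS =====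

-- finishing step of B's fold (projection form of the final match/if)
def finishB (t : List Int × Int × Int) : List Int :=
  if 0 < t.2.2 then t.1 ++ [t.2.2] else t.1

-- recursive form of B's grouping loop, used as the common specification
def goR (cur cnt : Int) : List Int → List Int
  | [] => [cnt]
  | d :: rest => if d ≤ cur then goR cur (cnt + 1) rest else cnt :: goR d 1 rest

def rle : List Int → List Int
  | [] => []
  | d :: rest => goR d 1 rest

def shiftDay (d : Int) : Int := max 1 (d - 1)

theorem dayB_ge_one (p s : Int) : 1 ≤ dayB p s := by
  unfold dayB; omega

theorem dayB_shift (p s : Int) (hs : 0 < s) : dayB (p + s) s = shiftDay (dayB p s) := by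
  unfold dayB shiftDay
  have h : PySem.Int.floordiv (p + s - 100) s = PySem.Int.floordiv (p - 100) s + 1 := by
    rw [PySem.Int.floordiv_eq_ediv_of_pos hs, PySem.Int.floordiv_eq_ediv_of_pos hs]
    have : p + s - 100 = (p - 100) + 1 * s := by ring
    rw [this, Int.add_mul_ediv_right _ _ (by omega : s ≠ 0)]
  rw [h]; omega

theorem dayB_one_iff (p s : Int) (hs : 0 < s) : dayB p s = 1 ↔ 100 ≤ p + s := by
  have h1 : (-1 : Int) ≤ PySem.Int.floordiv (p - 100) s ↔ (-1) * s ≤ p - 100 :=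
    PySem.Int.le_floordiv_iff_mul_le hs
  rw [show ((-1) * s : Int) = -s by ring] at h1
  unfold dayB
  omega

-- B's foldl equals goR
theorem foldB_goR (l : List Int) : ∀ result cur cnt, 0 < cnt →
    finishB (l.foldl stepB (result, cur, cnt)) = result ++ goR cur cnt l := by
  induction l with
  | nil => intro result cur cnt h; simp [finishB, goR, if_pos h]
  | cons d rest ih =>
    intro result cur cnt h
    by_cases hd : d ≤ cur
    · have hc : (0 < cnt ∧ d ≤ cur) := ⟨h, hd⟩
      simp only [List.foldl_cons, stepB, if_pos hc, goR, if_pos hd]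
      exact ih result cur (cnt + 1) (by omega)
    · have hc : ¬ (0 < cnt ∧ d ≤ cur) := by tauto
      simp only [List.foldl_cons, stepB, if_neg hc, if_pos h, goR, if_neg hd]
      rw [ih (result ++ [cnt]) d 1 (by omega)]
      simp

theorem alt_eq_rle (progresses speeds : List Int) :
    solution_alt progresses speeds = rle (List.zipWith dayB progresses speeds) := by
  have halt : solution_alt progresses speeds
      = finishB ((List.zipWith dayB progresses speeds).foldl stepB ([], 0, 0)) := rfl
  rw [halt]
  cases h : List.zipWith dayB progresses speeds with
  | nil => simp [finishB, rle]
  | cons d rest =>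
    have hc : ¬ (0 < (0:Int) ∧ d ≤ (0:Int)) := by omega
    simp only [List.foldl_cons, stepB, if_neg hc, if_neg (by omega : ¬ (0:Int) < 0)]
    rw [foldB_goR rest [] d 1 (by omega)]
    simp [rle]

-- days of the advanced list are the shifted days
theorem zip_shift : ∀ (prog speeds : List Int),
    (∀ s ∈ speeds.take prog.length, 0 < s) →
    List.zipWith dayB (List.zipWith (· + ·) prog speeds) speeds
      = (List.zipWith dayB prog speeds).map shiftDay := by
  intro prog
  induction prog with
  | nil => intro speeds _; simp
  | cons p pt ih =>
    intro speeds hs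
    cases speeds with
    | nil => simp
    | cons s st =>
      simp only [List.zipWith_cons_cons, List.map_cons]
      have hs0 : 0 < s := hs s (by simp)
      rw [dayB_shift p s hs0, ih st (fun x hx => hs x (List.mem_cons_of_mem _ (by
        simpa using hx)))]

theorem days_ge_one : ∀ (prog speeds : List Int) d,
    d ∈ List.zipWith dayB prog speeds → 1 ≤ d := by
  intro prog
  induction prog with
  | nil => intro speeds d hd; simp at hd
  | cons p pt ih =>
    intro speeds d hd
    cases speeds with
    | nil => simp at hd
    | cons s st =>
      simp only [List.zipWith_cons_cons, List.mem_cons] at hd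
      rcases hd with rfl | hd
      · exact dayB_ge_one p s
      · exact ih st d hd

-- goR is insensitive to shifting all days down by one while the batch max stays ≥ 2
theorem goR_shift : ∀ (l : List Int) (cur cnt : Int), 2 ≤ cur → (∀ d ∈ l, 1 ≤ d) →
    goR (cur - 1) cnt (l.map shiftDay) = goR cur cnt l := by
  intro l
  induction l with
  | nil => intro cur cnt _ _; simp [goR]
  | cons d rest ih =>
    intro cur cnt hcur hl
    have hd1 : 1 ≤ d := hl d (by simp)
    have hrest : ∀ x ∈ rest, 1 ≤ x := fun x hx => hl x (List.mem_cons_of_mem _ hx)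
    simp only [List.map_cons, goR]
    by_cases hle : d ≤ cur
    · rw [if_pos (by unfold shiftDay; omega), if_pos hle]
      exact ih cur (cnt + 1) hcur hrest
    · rw [if_neg (by unfold shiftDay; omega), if_neg hle]
      have : shiftDay d = d - 1 := by unfold shiftDay; omega
      rw [this, ih d 1 (by omega) hrest]

theorem rle_shift (l : List Int) (hl : ∀ d ∈ l, 1 ≤ d)
    (hhead : ∀ d, l.head? = some d → 2 ≤ d) :
    rle (l.map shiftDay) = rle l := by
  cases l with
  | nil => simp
  | cons d rest =>
    have hd : 2 ≤ d := hhead d rfl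
    simp only [List.map_cons, rle]
    have : shiftDay d = d - 1 := by unfold shiftDay; omega
    rw [this]
    exact goR_shift rest d 1 hd (fun x hx => hl x (List.mem_cons_of_mem _ hx))

-- splitting off the leading batch of days equal to 1
theorem goR_ones : ∀ (l : List Int) (cnt : Int), 0 < cnt → (∀ d ∈ l, 1 ≤ d) →
    goR 1 cnt l = (cnt + ((l.takeWhile (fun d => d ≤ 1)).length : Int))
      :: rle (l.dropWhile (fun d => d ≤ 1)) := by
  intro l
  induction l with
  | nil => intro cnt _ _; simp [goR, rle]
  | cons d rest ih =>
    intro cnt hcnt hl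
    have hd1 : 1 ≤ d := hl d (by simp)
    have hrest : ∀ x ∈ rest, 1 ≤ x := fun x hx => hl x (List.mem_cons_of_mem _ hx)
    by_cases hle : d ≤ (1:Int)
    · simp only [goR, if_pos hle, List.takeWhile_cons, List.dropWhile_cons,
        decide_eq_true hle]
      simp only [ite_true]
      rw [ih (cnt + 1) (by omega) hrest]
      simp only [List.length_cons]
      congr 1
      push_cast
      ring
    · simp only [goR, if_neg hle, List.takeWhile_cons, List.dropWhile_cons,
        decide_eq_false hle]
      simp [rle]

theorem rle_ones (l : List Int) (hl : ∀ d ∈ l, 1 ≤ d) (hhead : l.head? = some 1) :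
    rle l = (((l.takeWhile (fun d => d ≤ 1)).length : Int))
      :: rle (l.dropWhile (fun d => d ≤ 1)) := by
  cases l with
  | nil => simp at hhead
  | cons d rest =>
    have hd : d = 1 := by simpa using hhead
    subst hd
    simp only [rle]
    rw [goR_ones rest 1 (by omega) (fun x hx => hl x (List.mem_cons_of_mem _ hx))]
    simp only [List.takeWhile_cons, List.dropWhile_cons, decide_eq_true (le_refl (1:Int))]
    simp only [ite_true, List.length_cons]
    congr 1
    push_cast
    ring

-- popLoop characterisation
theorem popLoop_spec : ∀ (prog speeds : List Int) (okay : Int),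
    prog.length ≤ speeds.length →
    popLoop prog speeds okay =
      (prog.dropWhile (fun p => 100 ≤ p),
       speeds.drop (prog.takeWhile (fun p => 100 ≤ p)).length,
       okay + ((prog.takeWhile (fun p => 100 ≤ p)).length : Int)) := by
  intro prog
  induction prog with
  | nil => intro speeds okay _; simp [popLoop]
  | cons p pt ih =>
    intro speeds okay hlen
    cases speeds with
    | nil => simp at hlen
    | cons s st =>
      by_cases hp : 100 ≤ p
      · simp only [popLoop, if_pos hp, List.takeWhile_cons, List.dropWhile_cons,
          decide_eq_true hp]
        rw [ih st (okay + 1) (by simpa using hlen)]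
        simp only [ite_true, List.length_cons, List.drop_succ_cons, Prod.mk.injEq]
        refine ⟨trivial, trivial, ?_⟩
        push_cast
        ring
      · simp only [popLoop, if_neg hp, List.takeWhile_cons, List.dropWhile_cons,
          decide_eq_false hp]
        simp

theorem fuelFor_mono : ∀ (l : List Int) (a : Nat), a ≤ l.foldl (fun a p => a + (100 - p).toNat + 1) a := by
  intro l
  induction l with
  | nil => intro a; simp
  | cons p pt ih =>
    intro a
    exact le_trans (by omega) (ih (a + (100 - p).toNat + 1))

theorem dayB_le_bound (p s : Int) (hs : 0 < s) : dayB p s ≤ ((100 - p).toNat : Int) + 1 := by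
  have ht : ((100 - p).toNat : Int) ≤ ((100 - p).toNat : Int) * s :=
    le_mul_of_one_le_right (Int.natCast_nonneg _) (by omega)
  have h2 : (-((100 - p).toNat : Int)) * s ≤ p - 100 := by
    rw [show (-((100 - p).toNat : Int)) * s = -(((100 - p).toNat : Int) * s) by ring]
    omega
  have h1 : (-((100 - p).toNat : Int)) ≤ PySem.Int.floordiv (p - 100) s :=
    (PySem.Int.le_floordiv_iff_mul_le hs).mpr h2
  unfold dayB
  omega

theorem fuel_sufficient : ∀ (prog speeds : List Int) (a : Nat), 1 ≤ a →
    (∀ s ∈ speeds.take prog.length, 0 < s) →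
    ∀ d ∈ List.zipWith dayB prog speeds,
      d ≤ ((prog.foldl (fun a p => a + (100 - p).toNat + 1) a : Nat) : Int) := by
  intro prog
  induction prog with
  | nil => intro speeds a _ _ d hd; simp at hd
  | cons p pt ih =>
    intro speeds a ha hs d hd
    cases speeds with
    | nil => simp at hd
    | cons s st =>
      have hs0 : 0 < s := hs s (by simp)
      simp only [List.zipWith_cons_cons, List.mem_cons] at hd
      simp only [List.foldl_cons]
      rcases hd with rfl | hd
      · have h1 := dayB_le_bound p s hs0
        have h2 : a + (100 - p).toNat + 1
            ≤ pt.foldl (fun a p => a + (100 - p).toNat + 1) (a + (100 - p).toNat + 1) :=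
          fuelFor_mono pt (a + (100 - p).toNat + 1)
        omega
      · exact ih st (a + (100 - p).toNat + 1) (by omega)
          (fun x hx => hs x (List.mem_cons_of_mem _ (by simpa using hx))) d hd

theorem dw_eq_drop (p : Int → Bool) (l : List Int) :
    l.dropWhile p = l.drop (l.takeWhile p).length := by
  induction l with
  | nil => rfl
  | cons a t ih =>
    by_cases h : p a
    · simp [h, ih]
    · simp [h]

theorem head_dw (p : Int → Bool) : ∀ (l t : List Int) (d : Int), l.dropWhile p = d :: t →
    p d = false := by
  intro l
  induction l with
  | nil => intro t d h; simp at h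
  | cons a l2 ih =>
    intro t d h
    by_cases hp : p a
    · rw [List.dropWhile_cons, if_pos (by simpa using hp)] at h
      exact ih t d h
    · rw [List.dropWhile_cons, if_neg (by simpa using hp)] at h
      cases h
      simpa using hp

-- leading run of already-finished features = leading run of days equal to 1
theorem tw_zip : ∀ (prog speeds : List Int), (∀ x ∈ speeds.take prog.length, 0 < x) →
    ((List.zipWith (· + ·) prog speeds).takeWhile (fun q => 100 ≤ q)).length
      = ((List.zipWith dayB prog speeds).takeWhile (fun d => d ≤ 1)).length := by
  intro prog
  induction prog with
  | nil => intro speeds _; simp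
  | cons p pt ih =>
    intro speeds hs
    cases speeds with
    | nil => simp
    | cons s st =>
      have hs0 : 0 < s := hs s (by simp)
      have hiff : dayB p s ≤ 1 ↔ 100 ≤ p + s := by
        have h1 := dayB_one_iff p s hs0
        have h2 := dayB_ge_one p s
        omega
      have hrec := ih st (fun x hx => hs x (List.mem_cons_of_mem _ (by simpa using hx)))
      by_cases h : 100 ≤ p + s
      · simp [h, hiff.mpr h, hrec]
      · have hno : ¬ dayB p s ≤ 1 := fun hh => h (hiff.mp hh)
        simp [h, hno]

-- the main simulation lemma
theorem simLoop_eq : ∀ (fuel : Nat) (prog speeds result : List Int),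
    prog.length ≤ speeds.length →
    (∀ s ∈ speeds.take prog.length, 0 < s) →
    (∀ d ∈ List.zipWith dayB prog speeds, d ≤ (fuel : Int)) →
    simLoop prog speeds result fuel = result ++ rle (List.zipWith dayB prog speeds) := by
  intro fuel
  induction fuel with
  | zero =>
    intro prog speeds result hlen hs hf
    have : List.zipWith dayB prog speeds = [] := by
      by_contra hne
      obtain ⟨d, hd⟩ := List.exists_mem_of_ne_nil _ hne
      have := days_ge_one prog speeds d hd
      have := hf d hd
      omega
    have hprog : prog = [] := by
      have hlz : min prog.length speeds.length = 0 := by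
        simpa [List.length_zipWith] using congrArg List.length this
      exact List.eq_nil_of_length_eq_zero (by omega)
    subst hprog
    simp [simLoop, rle]
  | succ fuel ih =>
    intro prog speeds result hlen hs hf
    cases prog with
    | nil => simp [simLoop, rle]
    | cons p pt =>
      cases speeds with
      | nil => simp at hlen
      | cons s st =>
      have hlen' : (p :: pt).length ≤ (s :: st).length := hlen
      have hdays1 : ∀ d ∈ List.zipWith dayB (p :: pt) (s :: st), 1 ≤ d :=
        days_ge_one (p :: pt) (s :: st)
      have hzlen : (List.zipWith (· + ·) (p :: pt) (s :: st)).length ≤ (s :: st).length := by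
        simp [List.length_zipWith]
      have hpop := popLoop_spec (List.zipWith (· + ·) (p :: pt) (s :: st)) (s :: st) 0 hzlen
      have hk := tw_zip (p :: pt) (s :: st) hs
      set days := List.zipWith dayB (p :: pt) (s :: st) with hdaysdef
      set k := ((List.zipWith (· + ·) (p :: pt) (s :: st)).takeWhile (fun q => 100 ≤ q)).length with hkdef
      -- the popLoop result in drop form
      have hdw : (List.zipWith (· + ·) (p :: pt) (s :: st)).dropWhile (fun q => 100 ≤ q)
          = (List.zipWith (· + ·) (p :: pt) (s :: st)).drop k :=
        dw_eq_drop _ _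
      -- days of the next round's state
      have hnext : List.zipWith dayB ((List.zipWith (· + ·) (p :: pt) (s :: st)).drop k) ((s :: st).drop k)
          = (days.drop k).map shiftDay := by
        rw [← List.drop_zipWith, zip_shift (p :: pt) (s :: st) hs, ← List.map_drop]
      -- drop k days = dropWhile (≤ 1)
      have hdwd : days.dropWhile (fun d => d ≤ 1) = days.drop k := by
        rw [dw_eq_drop, ← hk]
      -- lengths
      have hkle : k ≤ (p :: pt).length := by
        have := List.Sublist.length_le
          (List.takeWhile_sublist (l := List.zipWith (· + ·) (p :: pt) (s :: st)) (fun q : Int => decide (100 ≤ q)))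
        simp only [List.length_zipWith] at this ⊢
        omega
      -- one simulation round
      have hstep : simLoop (p :: pt) (s :: st) result (fuel + 1)
          = simLoop ((List.zipWith (· + ·) (p :: pt) (s :: st)).drop k) ((s :: st).drop k)
              (if 0 < (0 + (k : Int)) then result ++ [0 + (k : Int)] else result) fuel := by
        rw [simLoop]
        simp only [List.isEmpty_cons, Bool.false_eq_true, if_false, hpop, hdw]
      rw [hstep]
      -- apply the induction hypothesis
      have hlen2 : ((List.zipWith (· + ·) (p :: pt) (s :: st)).drop k).length ≤ ((s :: st).drop k).length := by
        simp only [List.length_drop, List.length_zipWith] at *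
        omega
      have hpos2 : ∀ x ∈ ((s :: st).drop k).take ((List.zipWith (· + ·) (p :: pt) (s :: st)).drop k).length, 0 < x := by
        intro x hx
        rw [List.take_drop] at hx
        have hx' := List.mem_of_mem_drop hx
        have hxx : x ∈ (s :: st).take (p :: pt).length := by
          have hle : k + ((List.zipWith (· + ·) (p :: pt) (s :: st)).drop k).length ≤ (p :: pt).length := by
            simp only [List.length_drop, List.length_zipWith]
            omega
          have h3 : (s :: st).take (k + ((List.zipWith (· + ·) (p :: pt) (s :: st)).drop k).length)
              = ((s :: st).take (p :: pt).length).take (k + ((List.zipWith (· + ·) (p :: pt) (s :: st)).drop k).length) := by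
            rw [List.take_take, Nat.min_eq_left hle]
          rw [h3] at hx'
          exact List.mem_of_mem_take hx'
        exact hs x hxx
      -- bound the fuel for the next round
      have hfuel1 : (days.drop k).map shiftDay ≠ [] → 1 ≤ fuel := by
        intro hne
        have : days.drop k ≠ [] := by simpa using hne
        cases hcase : days.drop k with
        | nil => exact absurd hcase this
        | cons e t =>
          have hfail : (decide (e ≤ (1:Int))) = false := head_dw _ days t e (hdwd.trans hcase)
          have he2 : 2 ≤ e := by
            have : ¬ (e ≤ 1) := by simpa using hfail
            omega
          have hemem : e ∈ days := List.mem_of_mem_drop (hcase ▸ List.mem_cons_self ..)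
          have := hf e hemem
          omega
      have hf2 : ∀ d ∈ (days.drop k).map shiftDay, d ≤ (fuel : Int) := by
        intro d hd
        obtain ⟨e, he, rfl⟩ := List.mem_map.mp hd
        have he' : e ∈ days := List.mem_of_mem_drop he
        have h1 := hf e he'
        have h2 := hdays1 e he'
        have h3 : 1 ≤ fuel := hfuel1 (by
          intro hnil
          rw [hnil] at hd
          simp at hd)
        unfold shiftDay
        omega
      rw [ih _ _ _ hlen2 hpos2 (hnext ▸ hf2), hnext]
      -- now pure list reasoning on days
      by_cases hk0 : k = 0
      · rw [if_neg (by omega)]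
        rw [hk0]
        simp only [List.drop_zero]
        congr 1
        apply rle_shift days hdays1
        intro d hd
        cases hcd : days with
        | nil => rw [hcd] at hd; simp at hd
        | cons d0 rest =>
          rw [hcd] at hd
          simp only [List.head?_cons, Option.some.injEq] at hd
          subst hd
          have hfail : ¬ (d0 ≤ (1:Int)) := by
            by_contra hle
            have : ((d0 :: rest).takeWhile (fun d : Int => d ≤ 1)).length ≠ 0 := by
              simp [hle]
            rw [← hcd] at this
            omega
          have hd1 : 1 ≤ d0 := hdays1 d0 (by rw [hcd]; simp)
          omega
      · have hkpos : 0 < (0 + (k : Int)) := by omega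
        rw [if_pos hkpos]
        have hhead1 : days.head? = some 1 := by
          cases hcd : days with
          | nil =>
            rw [hcd] at hk
            simp at hk
            omega
          | cons d0 rest =>
            have hd0mem : d0 ∈ days := by rw [hcd]; simp
            have hd1 : 1 ≤ d0 := hdays1 d0 hd0mem
            have hle : d0 ≤ 1 := by
              by_contra hgt
              rw [hcd] at hk
              simp [hgt] at hk
              omega
            simp [List.head?_cons]
            omega
        have hro := rle_ones days hdays1 hhead1
        rw [hdwd] at hro
        have hrs : rle ((days.drop k).map shiftDay) = rle (days.drop k) := by
          apply rle_shift _ (fun d hd => hdays1 d (List.mem_of_mem_drop hd))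
          intro d hd
          cases hcase : days.drop k with
          | nil => rw [hcase] at hd; simp at hd
          | cons e t =>
            rw [hcase] at hd
            simp only [List.head?_cons, Option.some.injEq] at hd
            have hfail : (decide (e ≤ (1:Int))) = false := head_dw _ days t e (hdwd.trans hcase)
            have h5 : ¬ (e ≤ 1) := by simpa using hfail
            omega
        rw [hrs, hro]
        have htwk : ((days.takeWhile (fun d => d ≤ 1)).length : Int) = (k : Int) := by
          omega
        rw [htwk]
        simp

-- ===== VERDICT (by name: the statement is the Claim_ definition above) =====
theorem solution_spec : Claim_equal_solution := by
  intro progresses speeds _ hpre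
  unfold Spec_solution
  rw [alt_eq_rle]
  unfold solution
  exact simLoop_eq (fuelFor progresses) progresses speeds [] hpre.1 hpre.2
    (fuel_sufficient progresses speeds 1 (le_refl 1) hpre.2)
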